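-- pv_equiv track=rewrite | github.com/tobstern/AOC2024_py | days/day08.py | get_all_pairs
-- ===== SOURCE A (Python) =====
-- def get_all_pairs(list_of_poss):
--     pairs = []
--     for i, pos in enumerate(list_of_poss):
--         for j in range(len(list_of_poss)):
--             pair = (pos, list_of_poss[j])
--             if pair != (pos, pos) and (list_of_poss[j], pos) not in pairs:
--                 pairs.append(pair)
--
--     return pairs
-- ===== SOURCE B (Python) =====
-- def get_all_pairs(list_of_poss):
--     # A's output is characterized by first-occurrence order: (p, q) is emitted
--     # (once per occurrence pair, in nested order) exactly when the first
--     # occurrence of p precedes the first occurrence of q.  So: one pass to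
--     # record first-occurrence indices, then a stateless double comprehension
--     # with that pure condition -- no 'seen pairs' state at all.
--     first = {}
--     for i, p in enumerate(list_of_poss):
--         if p not in first:
--             first[p] = i
--     return [(p, q) for p in list_of_poss for q in list_of_poss
--             if first[p] < first[q]]
-- ===== Notes on version B (the rewrite author's own statement) =====
-- stated objective: faster
-- what changed: B keeps no 'seen pairs' state at all: it proves/uses the characterization that A emits (p,q) exactly when p's first occurrence precedes q's, so it records first-occurrence indices in one pass and then emits pairs by the pure comparison first[p] < first[q].
import Mathlib
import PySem

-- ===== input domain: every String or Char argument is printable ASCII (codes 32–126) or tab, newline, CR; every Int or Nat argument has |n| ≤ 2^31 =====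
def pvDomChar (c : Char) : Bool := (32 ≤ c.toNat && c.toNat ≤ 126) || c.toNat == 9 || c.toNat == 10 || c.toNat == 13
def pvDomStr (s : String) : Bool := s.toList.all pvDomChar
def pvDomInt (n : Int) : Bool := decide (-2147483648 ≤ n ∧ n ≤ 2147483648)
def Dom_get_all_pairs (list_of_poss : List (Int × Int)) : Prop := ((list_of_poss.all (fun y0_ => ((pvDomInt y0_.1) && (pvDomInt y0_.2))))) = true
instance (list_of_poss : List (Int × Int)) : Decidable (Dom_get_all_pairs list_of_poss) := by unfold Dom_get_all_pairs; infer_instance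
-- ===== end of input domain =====

-- B drops A's growing 'pairs' membership scan entirely: one pass records each
-- value's first-occurrence index, then pairs are emitted by the pure
-- comparison of those indices (asymptotically faster).


-- ===== PORT A =====
-- for i, pos in enumerate(...): the index i is unused, so the outer loop folds
-- over the elements; the inner 'for j in range(len(..))' only reads
-- list_of_poss[j], so it folds over the elements in index order.
def get_all_pairs (list_of_poss : List (Int × Int)) : List ((Int × Int) × (Int × Int)) :=
  list_of_poss.foldl (fun pairs pos =>
    list_of_poss.foldl (fun pairs q =>
      if (pos, q) ≠ (pos, pos) ∧ (q, pos) ∉ pairs then pairs ++ [(pos, q)] else pairs)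
      pairs) []

-- ===== PORT B =====
-- first = {}; for i, p in enumerate(..): if p not in first: first[p] = i
-- then [(p, q) for p in .. for q in .. if first[p] < first[q]]
-- (first[p]/first[q] are always present since p, q come from the list itself,
-- so the total getD with default 0 is exact here).
def get_all_pairs_alt (list_of_poss : List (Int × Int)) : List ((Int × Int) × (Int × Int)) :=
  let first := (PySem.List.enumerate list_of_poss).foldl
    (fun d ip => if d.contains ip.2 then d else d.insert ip.2 ip.1) PySem.Dict.empty
  list_of_poss.flatMap (fun p =>
    (list_of_poss.filter (fun q => first.getD p 0 < first.getD q 0)).map (fun q => (p, q)))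

-- ===== PRECONDITION & SPEC =====
def Spec_get_all_pairs (list_of_poss : List (Int × Int)) (out : List ((Int × Int) × (Int × Int))) : Prop := out = get_all_pairs_alt list_of_poss
instance (list_of_poss : List (Int × Int)) (out : List ((Int × Int) × (Int × Int))) : Decidable (Spec_get_all_pairs list_of_poss out) := by unfold Spec_get_all_pairs; infer_instance

-- ===== CLAIM (what is proved, stated in full; the proofs are below) =====
def Claim_equal_get_all_pairs : Prop := ∀ (list_of_poss : List (Int × Int)), Dom_get_all_pairs list_of_poss → Spec_get_all_pairs list_of_poss (get_all_pairs list_of_poss)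

-- ===== LEMMAS AND PROOFS =====

-- A's inner-loop step, named for the proofs.
def stepA (pos : Int × Int) (pairs : List ((Int × Int) × (Int × Int))) (q : Int × Int) :
    List ((Int × Int) × (Int × Int)) :=
  if (pos, q) ≠ (pos, pos) ∧ (q, pos) ∉ pairs then pairs ++ [(pos, q)] else pairs

theorem get_all_pairs_eq_stepA (l : List (Int × Int)) :
    get_all_pairs l = l.foldl (fun pairs pos => l.foldl (stepA pos) pairs) [] := rfl

-- the common target: pairs of 'done' elements with every later-first-seen list element
def build (l done : List (Int × Int)) : List ((Int × Int) × (Int × Int)) :=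
  done.flatMap (fun p =>
    (l.filter (fun q => decide (l.idxOf p < l.idxOf q))).map (fun q => (p, q)))

theorem mem_build {l done : List (Int × Int)} {a b : Int × Int} :
    (a, b) ∈ build l done ↔ a ∈ done ∧ b ∈ l ∧ l.idxOf a < l.idxOf b := by
  simp only [build, List.mem_flatMap, List.mem_map, List.mem_filter, decide_eq_true_eq]
  constructor
  · rintro ⟨p, hp, q, ⟨hq, hlt⟩, he⟩
    obtain ⟨rfl, rfl⟩ := Prod.mk.injEq .. ▸ he
    exact ⟨hp, hq, hlt⟩
  · rintro ⟨ha, hb, hlt⟩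
    exact ⟨a, ha, b, ⟨hb, hlt⟩, rfl⟩

-- distinct members have distinct first-occurrence indices
theorem eq_of_idxOf_eq {l : List (Int × Int)} {a b : Int × Int} (ha : a ∈ l) (hb : b ∈ l)
    (h : l.idxOf a = l.idxOf b) : a = b := by
  have h1 := List.getElem_idxOf (List.idxOf_lt_length_of_mem ha)
  have h2 := List.getElem_idxOf (List.idxOf_lt_length_of_mem hb)
  rw [← h1, ← h2]
  congr 1

-- A's inner loop with a pure append condition C: appended elements all have
-- first component p, so the reverse-membership test only sees 'base'.
theorem innerA (p : Int × Int) (C : Int × Int → Prop) [DecidablePred C]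
    (hCp : ∀ q, C q → q ≠ p) :
    ∀ (l' : List (Int × Int)) (base extra : List ((Int × Int) × (Int × Int))),
      (∀ e ∈ extra, e.1 = p) →
      (∀ q ∈ l', ((q ≠ p ∧ (q, p) ∉ base) ↔ C q)) →
      l'.foldl (stepA p) (base ++ extra) =
        base ++ extra ++ (l'.filter (fun q => decide (C q))).map (fun q => (p, q)) := by
  intro l'
  induction l' with
  | nil => intro base extra _ _; simp
  | cons q l' ih =>
    intro base extra hextra hb
    have hcond : ((p, q) ≠ (p, p) ∧ (q, p) ∉ base ++ extra) ↔ C q := by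
      constructor
      · rintro ⟨hne, hnm⟩
        have hqp : q ≠ p := fun h => hne (by rw [h])
        exact (hb q (List.mem_cons_self ..)).mp
          ⟨hqp, fun h => hnm (List.mem_append_left _ h)⟩
      · intro hC
        have hqp : q ≠ p := hCp q hC
        refine ⟨fun h => hqp (congrArg Prod.snd h), ?_⟩
        intro h
        rcases List.mem_append.mp h with h | h
        · exact ((hb q (List.mem_cons_self ..)).mpr hC).2 h
        · exact hqp (hextra _ h)
    by_cases hC : C q
    · have hstep : stepA p (base ++ extra) q = base ++ (extra ++ [(p, q)]) := by
        rw [stepA, if_pos (hcond.mpr hC), List.append_assoc]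
      rw [List.foldl_cons, hstep,
        ih base (extra ++ [(p, q)])
          (by intro e he
              rcases List.mem_append.mp he with he | he
              · exact hextra _ he
              · simp only [List.mem_singleton] at he; rw [he]
          )
          (fun r hr => hb r (List.mem_cons_of_mem _ hr))]
      simp [hC]
    · have hstep : stepA p (base ++ extra) q = base ++ extra := by
        rw [stepA, if_neg (fun h => hC (hcond.mp h))]
      rw [List.foldl_cons, hstep,
        ih base extra hextra (fun r hr => hb r (List.mem_cons_of_mem _ hr))]
      simp [hC]

-- A's outer loop builds 'build l done' over a prefix 'done' of l.
theorem outerA (l : List (Int × Int)) :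
    ∀ (rest done : List (Int × Int)), l = done ++ rest →
      rest.foldl (fun pairs pos => l.foldl (stepA pos) pairs) (build l done) =
        build l (done ++ rest) := by
  intro rest
  induction rest with
  | nil => intro done _; simp
  | cons p rest ih =>
    intro done hl
    have hpref : (done ++ [p]) <+: l := ⟨rest, by rw [hl]; simp⟩
    have hpl : p ∈ l := hl ▸ List.mem_append_right _ (List.mem_cons_self ..)
    have hple : l.idxOf p ≤ done.length := by
      have := (hpref.mem_iff_idxOf_lt_length p).mp
        (List.mem_append_right _ (List.mem_cons_self ..))
      simp only [List.length_append, List.length_cons, List.length_nil] at this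
      omega
    have hdone : ∀ q : Int × Int, q ∈ done ↔ l.idxOf q < done.length := fun q =>
      List.IsPrefix.mem_iff_idxOf_lt_length (⟨p :: rest, hl.symm⟩ : done <+: l) q
    have hb : ∀ q ∈ l, ((q ≠ p ∧ (q, p) ∉ build l done) ↔ l.idxOf p < l.idxOf q) := by
      intro q hql
      constructor
      · rintro ⟨hqp, hnm⟩
        rcases Nat.lt_trichotomy (l.idxOf p) (l.idxOf q) with h | h | h
        · exact h
        · exact absurd (eq_of_idxOf_eq hql hpl h.symm) hqp
        · exact absurd (mem_build.mpr ⟨(hdone q).mpr (by omega), hpl, h⟩) hnm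
      · intro h
        refine ⟨fun he => by rw [he] at h; exact Nat.lt_irrefl _ h, fun hm => ?_⟩
        exact Nat.lt_irrefl _ (Nat.lt_trans (mem_build.mp hm).2.2 h)
    have hinner := innerA p (fun q => l.idxOf p < l.idxOf q)
      (fun q hC he => by rw [he] at hC; exact Nat.lt_irrefl _ hC)
      l (build l done) [] (by intro e he; simp at he) hb
    simp only [List.append_nil] at hinner
    have hstep : l.foldl (stepA p) (build l done) = build l (done ++ [p]) := by
      rw [hinner, build, build, List.flatMap_append]
      simp
    rw [List.foldl_cons, hstep, ih (done ++ [p]) (by rw [hl]; simp)]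
    simp

theorem A_eq_build (l : List (Int × Int)) : get_all_pairs l = build l l := by
  have h := outerA l l [] (by simp)
  simpa [build, get_all_pairs_eq_stepA] using h

-- the dict of first-occurrence indices B builds, named for the proofs
def firstDict (l : List (Int × Int)) : PySem.Dict (Int × Int) Int :=
  (PySem.List.enumerate l).foldl
    (fun d ip => if d.contains ip.2 then d else d.insert ip.2 ip.1) PySem.Dict.empty

theorem firstDict_get? (l : List (Int × Int)) (x : Int × Int) :
    (firstDict l).get? x = if x ∈ l then some (l.idxOf x : Int) else none := by
  induction l using List.reverseRecOn generalizing x with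
  | nil => simp [firstDict, PySem.List.enumerate_nil, PySem.Dict.get?_empty]
  | append_singleton l a ih =>
    have henum : PySem.List.enumerate (l ++ [a]) =
        PySem.List.enumerate l ++ [((l.length : Int), a)] := by
      rw [PySem.List.enumerate_append]
      simp [PySem.List.enumerate_cons, PySem.List.enumerate_nil]
    have hstep : firstDict (l ++ [a]) =
        if (firstDict l).contains a then firstDict l
        else (firstDict l).insert a (l.length : Int) := by
      rw [firstDict, henum, List.foldl_append]
      rfl
    have hcont : (firstDict l).contains a = decide (a ∈ l) := by
      rw [PySem.Dict.contains_eq_isSome_get?, ih a]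
      by_cases h : a ∈ l <;> simp [h]
    rw [hstep, hcont]
    by_cases ha : a ∈ l
    · rw [if_pos (by simp [ha]), ih x]
      by_cases hx : x ∈ l
      · rw [if_pos hx, if_pos (List.mem_append_left _ hx), List.idxOf_append_of_mem hx]
      · rw [if_neg hx]
        by_cases hxa : x ∈ l ++ [a]
        · rcases List.mem_append.mp hxa with h | h
          · exact absurd h hx
          · simp only [List.mem_singleton] at h
            exact absurd (h ▸ ha) hx
        · rw [if_neg hxa]
    · rw [if_neg (by simp [ha])]
      by_cases hxa : x = a
      · subst hxa
        rw [PySem.Dict.get?_insert_self, if_pos (List.mem_append_right _ (List.mem_singleton.mpr rfl)),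
          List.idxOf_append_of_notMem ha]
        simp
      · rw [PySem.Dict.get?_insert_of_ne _ _ hxa, ih x]
        by_cases hx : x ∈ l
        · rw [if_pos hx, if_pos (List.mem_append_left _ hx), List.idxOf_append_of_mem hx]
        · rw [if_neg hx, if_neg (by
            intro h
            rcases List.mem_append.mp h with h | h
            · exact hx h
            · exact hxa (List.mem_singleton.mp h))]

theorem firstDict_getD (l : List (Int × Int)) (x : Int × Int) (hx : x ∈ l) :
    (firstDict l).getD x 0 = (l.idxOf x : Int) := by
  rw [PySem.Dict.getD_eq_get?_getD, firstDict_get?, if_pos hx]; rfl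

theorem B_eq_build (l : List (Int × Int)) : get_all_pairs_alt l = build l l := by
  show l.flatMap (fun p =>
      (l.filter (fun q => (firstDict l).getD p 0 < (firstDict l).getD q 0)).map
        (fun q => (p, q))) = build l l
  rw [build, List.flatMap_def, List.flatMap_def]
  apply congrArg List.flatten
  apply List.map_congr_left
  intro p hp
  apply congrArg (List.map _)
  apply List.filter_congr
  intro q hq
  rw [firstDict_getD l p hp, firstDict_getD l q hq]
  simp

-- ===== VERDICT (by name: the statement is the Claim_ definition above) =====
theorem get_all_pairs_spec : Claim_equal_get_all_pairs := by
  intro l _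
  unfold Spec_get_all_pairs
  rw [A_eq_build, B_eq_build]
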